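-- pv_equiv track=rewrite | github.com/bearblog/nl2sql | utils.py | duplicate_relative_index
-- ===== SOURCE A (Python) =====
-- def duplicate_relative_index(conds):
--     value_dict = {}
--     duplicate_indices = []
--     for _, _, value in conds:
--         if value not in value_dict:
--             duplicate_indices.append(0)
--             value_dict[value] = 1
--         else:
--             duplicate_indices.append(value_dict[value])
--             value_dict[value] += 1
--     return duplicate_indices
-- ===== SOURCE B (Python) =====
-- def duplicate_relative_index(conds):
--     values = [v for _, _, v in conds]
--     return [values[:i].count(v) for i, v in enumerate(values)]
-- ===== Notes on version B (the rewrite author's own statement) =====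
-- stated objective: alternative
-- what changed: Replaces the running dict-counter loop with a stateless comprehension: each position gets the count of its value in the prefix values[:i].
import Mathlib
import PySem

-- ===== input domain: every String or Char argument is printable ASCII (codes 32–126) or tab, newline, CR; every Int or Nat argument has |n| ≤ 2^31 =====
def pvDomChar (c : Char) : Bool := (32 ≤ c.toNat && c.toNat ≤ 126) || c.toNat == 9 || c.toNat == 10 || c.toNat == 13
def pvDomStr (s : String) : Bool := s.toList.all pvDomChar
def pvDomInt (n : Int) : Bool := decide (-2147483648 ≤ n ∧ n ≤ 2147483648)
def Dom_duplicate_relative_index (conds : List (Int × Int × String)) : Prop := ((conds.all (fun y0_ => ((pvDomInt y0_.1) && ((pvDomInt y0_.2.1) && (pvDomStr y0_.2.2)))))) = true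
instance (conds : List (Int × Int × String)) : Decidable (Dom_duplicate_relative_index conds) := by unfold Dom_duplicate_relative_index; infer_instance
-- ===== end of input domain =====

-- B replaces A's running dict-counter loop with a stateless prefix-count comprehension (alternative decomposition, not faster).

-- ===== PORT A =====
def duplicate_relative_index (conds : List (Int × Int × String)) : List Int :=
  (conds.foldl
    (fun (st : PySem.Dict String Int × List Int) c =>
      let value := c.2.2
      if st.1.contains value = false then
        (st.1.insert value 1, st.2 ++ [(0 : Int)])
      else
        (st.1.insert value (st.1.getD value 0 + 1), st.2 ++ [st.1.getD value 0]))
    (PySem.Dict.empty, [])).2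

-- ===== PORT B =====
def duplicate_relative_index_alt (conds : List (Int × Int × String)) : List Int :=
  let values := conds.map (fun c => c.2.2)
  (PySem.List.enumerate values).map
    (fun iv => ((PySem.List.slice values none (some iv.1)).count iv.2 : Int))

-- ===== PRECONDITION & SPEC =====
def Spec_duplicate_relative_index (conds : List (Int × Int × String)) (out : List Int) : Prop := out = duplicate_relative_index_alt conds
instance (conds : List (Int × Int × String)) (out : List Int) : Decidable (Spec_duplicate_relative_index conds out) := by unfold Spec_duplicate_relative_index; infer_instance

-- ===== CLAIM (what is proved, stated in full; the proofs are below) =====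
def Claim_equal_duplicate_relative_index : Prop := ∀ (conds : List (Int × Int × String)), Dom_duplicate_relative_index conds → Spec_duplicate_relative_index conds (duplicate_relative_index conds)

-- ===== LEMMAS AND PROOFS =====

/-- Reference: rank of each value relative to the prefix `prev`. -/
def rankGo : List String → List String → List Int
  | _, [] => []
  | prev, v :: t => (prev.count v : Int) :: rankGo (prev ++ [v]) t

theorem aLoop_eq_rankGo (l : List (Int × Int × String)) :
    ∀ (prev : List String) (d : PySem.Dict String Int) (acc : List Int),
    (∀ v, d.getD v 0 = (prev.count v : Int)) →
    (∀ v, d.contains v = prev.contains v) →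
    (l.foldl
      (fun (st : PySem.Dict String Int × List Int) c =>
        let value := c.2.2
        if st.1.contains value = false then
          (st.1.insert value 1, st.2 ++ [(0 : Int)])
        else
          (st.1.insert value (st.1.getD value 0 + 1), st.2 ++ [st.1.getD value 0]))
      (d, acc)).2 = acc ++ rankGo prev (l.map (·.2.2)) := by
  induction l with
  | nil => intro prev d acc _ _; simp [rankGo]
  | cons c t ih =>
    intro prev d acc hget hcon
    simp only [List.foldl_cons, List.map_cons, rankGo]
    by_cases h : d.contains c.2.2 = false
    · have hmem : c.2.2 ∉ prev := by
        have := hcon c.2.2; rw [h] at this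
        simpa using this.symm
      have hcnt0 : prev.count c.2.2 = 0 := List.count_eq_zero.mpr hmem
      rw [if_pos h, ih (prev ++ [c.2.2]) _ _ ?_ ?_]
      · simp [hcnt0]
      · intro v
        rw [PySem.Dict.getD_insert]
        by_cases hv : v = c.2.2
        · subst hv; simp [List.count_append, hcnt0]
        · simp [hv, hget v, List.count_append, Ne.symm hv]
      · intro v
        rw [PySem.Dict.contains_insert]
        by_cases hv : v = c.2.2
        · subst hv; simp
        · simp [hv, hcon v]
    · rw [if_neg h, ih (prev ++ [c.2.2]) _ _ ?_ ?_]
      · simp [hget c.2.2]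
      · intro v
        rw [PySem.Dict.getD_insert]
        by_cases hv : v = c.2.2
        · subst hv; simp [hget c.2.2, List.count_append]
        · simp [hv, hget v, List.count_append, Ne.symm hv]
      · intro v
        rw [PySem.Dict.contains_insert]
        by_cases hv : v = c.2.2
        · subst hv; simp
        · simp [hv, hcon v]

theorem enum_slice_eq_rankGo (vs : List String) :
    ∀ (prev : List String),
    (PySem.List.enumerate vs (prev.length : Int)).map
      (fun iv => ((PySem.List.slice (prev ++ vs) none (some iv.1)).count iv.2 : Int))
    = rankGo prev vs := by
  induction vs with
  | nil => intro prev; simp [PySem.List.enumerate_nil, rankGo]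
  | cons v t ih =>
    intro prev
    rw [PySem.List.enumerate_cons, List.map_cons, rankGo]
    simp only []
    rw [List.cons_eq_cons]
    constructor
    · rw [PySem.List.slice_to_natCast]
      simp
    · have h1 : ((prev.length : Int) + 1) = (((prev ++ [v]).length : Nat) : Int) := by
        simp
      have h2 : prev ++ v :: t = (prev ++ [v]) ++ t := by simp
      rw [h1, h2]
      have := ih (prev ++ [v])
      simpa using this

-- ===== VERDICT (by name: the statement is the Claim_ definition above) =====
theorem duplicate_relative_index_spec : Claim_equal_duplicate_relative_index := by
  intro conds _
  unfold Spec_duplicate_relative_index duplicate_relative_index duplicate_relative_index_alt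
  rw [aLoop_eq_rankGo conds [] PySem.Dict.empty []
    (by intro v; simp [PySem.Dict.getD_empty]) (by intro v; simp [PySem.Dict.contains_empty])]
  have := enum_slice_eq_rankGo (conds.map (·.2.2)) []
  simpa using this.symm
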